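-- pv_equiv track=rewrite | github.com/ivales/SpecialistPython1 | Module5/practice/repeat/09_task_repeat.py | list_char_count
-- ===== SOURCE A (Python) =====
-- def list_char_count(fruit_list):
--     list_chars=[]
--     for word in fruit_list:
--         list_chars.append(word.lower()[0])
--     list_counts=[]
--     count=0
--     for char in list_chars:
--         if count<list_chars.count(char):
--             count=list_chars.count(char)
--     for char in list_chars:
--         if count==list_chars.count(char) and char not in list_counts:
--             list_counts.append(char)
--     return list_counts
-- ===== SOURCE B (Python) =====
-- def list_char_count(fruit_list):
--     counts = {}
--     for word in fruit_list:
--         c = word.lower()[0]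
--         counts[c] = counts.get(c, 0) + 1
--     m = max(counts.values(), default=0)
--     return [c for c, n in counts.items() if n == m]
-- ===== Notes on version B (the rewrite author's own statement) =====
-- stated objective: simpler
-- what changed: B builds a frequency dict over the first letters in one pass and emits the dict's distinct keys whose count equals the max of the dict values, replacing A's repeated list.count rescans and its membership-based dedup loop over the full char list.
import Mathlib
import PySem

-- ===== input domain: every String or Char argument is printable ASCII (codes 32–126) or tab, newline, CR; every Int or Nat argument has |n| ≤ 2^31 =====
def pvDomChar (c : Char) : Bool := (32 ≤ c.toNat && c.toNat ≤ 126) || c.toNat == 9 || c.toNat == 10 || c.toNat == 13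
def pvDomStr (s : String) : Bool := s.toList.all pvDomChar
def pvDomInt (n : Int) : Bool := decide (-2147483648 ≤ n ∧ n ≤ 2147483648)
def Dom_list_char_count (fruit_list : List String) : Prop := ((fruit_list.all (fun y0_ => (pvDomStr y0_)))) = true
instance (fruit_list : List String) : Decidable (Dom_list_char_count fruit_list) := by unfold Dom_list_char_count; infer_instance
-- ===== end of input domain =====

-- B replaces A's repeated .count rescans and membership dedup by one frequency dict
-- iterated over its distinct keys (objective: simpler); same return value on Pre_.

-- ===== PORT A =====
-- word.lower()[0] as a one-character string; "" only where Python would raise IndexError (excluded by Pre_)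
def low0 (w : String) : String :=
  match PySem.Str.pyGet? (PySem.Str.lower w) 0 with
  | some c => String.ofList [c]
  | none => ""

def list_char_count (fruit_list : List String) : List String :=
  let list_chars := fruit_list.foldl (fun acc word => acc ++ [low0 word]) []
  let count := list_chars.foldl (fun count c =>
    if count < (list_chars.count c : Int) then (list_chars.count c : Int) else count) 0
  list_chars.foldl (fun acc c =>
    if count = (list_chars.count c : Int) ∧ c ∉ acc then acc ++ [c] else acc) []

-- ===== PORT B =====
def list_char_count_alt (fruit_list : List String) : List String :=
  let counts : PySem.Dict String Int :=
    fruit_list.foldl (fun d word => d.modify (low0 word) 0 (· + 1)) PySem.Dict.empty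
  let m := PySem.List.maxD counts.values (fun v => v) 0
  (counts.items.filter (fun p => p.2 == m)).map (fun p => p.1)

-- ===== PRECONDITION & SPEC =====
-- Pre_ excludes lists containing an empty string: there Python A raises IndexError at word.lower()[0] (B raises too).
def Pre_list_char_count (fruit_list : List String) : Prop := ∀ w ∈ fruit_list, w.toList ≠ []
instance (fruit_list : List String) : Decidable (Pre_list_char_count fruit_list) := by
  unfold Pre_list_char_count; infer_instance
def pvWitness_list_char_count : List String := ["Apple", "avocado", "Banana", "cherry"]
def Spec_list_char_count (fruit_list : List String) (out : List String) : Prop := out = list_char_count_alt fruit_list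
instance (fruit_list : List String) (out : List String) : Decidable (Spec_list_char_count fruit_list out) := by unfold Spec_list_char_count; infer_instance

-- ===== CLAIM (what is proved, stated in full; the proofs are below) =====
def Claim_equal_list_char_count : Prop := ∀ (fruit_list : List String), Dom_list_char_count fruit_list → Pre_list_char_count fruit_list → Spec_list_char_count fruit_list (list_char_count fruit_list)

-- ===== LEMMAS AND PROOFS =====

-- 'if a < b then b else a' is max
theorem pv_if_lt_max (a b : Int) : (if a < b then b else a) = max a b := by
  rcases le_or_gt b a with h | h
  · simp [max_eq_left h, not_lt.mpr h]
  · simp [max_eq_right (le_of_lt h), h]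

-- first-occurrence dedup commutes with filter
theorem pv_ofList_filter (p : String → Bool) (cs : List String) :
    PySem.Set.ofList (cs.filter p) = (PySem.Set.ofList cs).filter p := by
  induction cs with
  | nil => rfl
  | cons c cs ih =>
    by_cases hp : p c
    · rw [List.filter_cons_of_pos hp, PySem.Set.ofList_cons, PySem.Set.ofList_cons,
        List.filter_cons_of_pos hp, ih]
      simp only [PySem.Set.discard, List.filter_filter]
      congr 1
      exact List.filter_congr (fun a _ => Bool.and_comm _ _)
    · rw [List.filter_cons_of_neg hp, PySem.Set.ofList_cons,
        List.filter_cons_of_neg hp, ih]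
      simp only [PySem.Set.discard, List.filter_filter]
      refine (List.filter_congr fun a _ => ?_).symm
      by_cases hac : a = c
      · subst hac
        have hf : p a = false := Bool.eq_false_iff.mpr hp
        simp [hf]
      · simp [beq_eq_false_iff_ne.mpr hac]

-- A's third loop ('if P(c) and c not in out: out.append(c)') is a filtered ordered dedup
theorem pv_foldl_dedup_filter (P : String → Prop) [DecidablePred P] (cs : List String)
    (acc : List String) :
    cs.foldl (fun acc c => if P c ∧ c ∉ acc then acc ++ [c] else acc) acc
      = acc ++ (PySem.Set.ofList (cs.filter (fun c => decide (P c)))).filter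
          (fun c => !decide (c ∈ acc)) := by
  induction cs generalizing acc with
  | nil => simp [PySem.Set.ofList, PySem.Set.empty]
  | cons c cs ih =>
    rw [List.foldl_cons]
    by_cases hP : P c
    · by_cases hc : c ∈ acc
      · have hstep : (if P c ∧ c ∉ acc then acc ++ [c] else acc) = acc := by
          simp [hc]
        rw [hstep, ih, List.filter_cons_of_pos (by simpa using hP), PySem.Set.ofList_cons]
        rw [List.filter_cons_of_neg (by simpa using hc)]
        congr 1
        simp only [PySem.Set.discard, List.filter_filter]
        refine List.filter_congr fun a _ => ?_
        by_cases hac : a = c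
        · subst hac; simp [hc]
        · simp [beq_eq_false_iff_ne.mpr hac]
      · have hstep : (if P c ∧ c ∉ acc then acc ++ [c] else acc) = acc ++ [c] := by
          simp [hP, hc]
        rw [hstep, ih, List.filter_cons_of_pos (by simpa using hP), PySem.Set.ofList_cons]
        rw [List.filter_cons_of_pos (by simpa using hc), List.append_assoc]
        congr 1
        rw [List.singleton_append]
        congr 1
        simp only [PySem.Set.discard, List.filter_filter]
        refine List.filter_congr fun a _ => ?_
        by_cases hac : a = c
        · subst hac; simp
        · by_cases haa : a ∈ acc
          · simp [hac, haa, List.mem_append]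
          · simp [hac, haa, List.mem_append, beq_eq_false_iff_ne.mpr hac]
    · have hstep : (if P c ∧ c ∉ acc then acc ++ [c] else acc) = acc := by
        simp [hP]
      rw [hstep, ih, List.filter_cons_of_neg (by simpa using hP)]

theorem pv_eq (fruit_list : List String) :
    list_char_count fruit_list = list_char_count_alt fruit_list := by
  by_cases hfl : fruit_list = []
  · subst hfl; rfl
  · simp only [list_char_count, list_char_count_alt]
    have hcounter : fruit_list.foldl (fun d word => d.modify (low0 word) 0 (· + 1))
        (PySem.Dict.empty : PySem.Dict String Int) = PySem.Dict.counter (fruit_list.map low0) := by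
      rw [PySem.Dict.counter_eq_foldl, List.foldl_map]
    rw [PySem.List.foldl_append_singleton_eq_map, List.nil_append, hcounter]
    set cs : List String := fruit_list.map low0 with hcsdef
    have hcs : cs ≠ [] := by simpa [hcsdef] using hfl
    set cnt : String → Int := fun c => (cs.count c : Int) with hcntdef
    -- A's running max
    have hM : cs.foldl (fun count c =>
        if count < (cs.count c : Int) then (cs.count c : Int) else count) 0
        = (cs.map cnt).foldl max 0 := by
      conv_rhs => rw [List.foldl_map]
      apply PySem.List.foldl_congr_mem
      intro acc x _
      exact pv_if_lt_max acc (cnt x)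
    set M : Int := (cs.map cnt).foldl max 0 with hMdef
    -- B's dict values
    have hvals : (PySem.Dict.counter cs).values = (PySem.Set.ofList cs).map cnt := by
      show ((PySem.Dict.counter cs).items).map Prod.snd = _
      rw [PySem.Dict.items_counter, List.map_map]
      rfl
    -- B's max is A's max
    have hone : ∃ v, PySem.List.max? ((PySem.Dict.counter cs).values) (fun v => v) = some v := by
      cases h : PySem.List.max? ((PySem.Dict.counter cs).values) (fun v => v) with
      | none =>
        rw [PySem.List.max?_eq_none_iff, hvals, List.map_eq_nil_iff] at h
        rcases cs with _ | ⟨c, cs'⟩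
        · exact absurd rfl hcs
        · rw [PySem.Set.ofList_cons] at h; cases h
      | some v => exact ⟨v, rfl⟩
    obtain ⟨v, hv⟩ := hone
    have hvM : v = M := by
      apply le_antisymm
      · -- v is the count of some key, every count ≤ M
        have hmem := PySem.List.max?_mem hv
        rw [hvals, List.mem_map] at hmem
        obtain ⟨k, hk, rfl⟩ := hmem
        have hk' : k ∈ cs := (PySem.Set.mem_ofList _ _).1 hk
        exact (PySem.List.le_foldl_max (cs.map cnt) 0).2 _ (List.mem_map_of_mem hk')
      · rcases PySem.List.foldl_max_mem (cs.map cnt) 0 with h0 | hmemM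
        · -- M = 0 ≤ v since v is a count
          rw [← hMdef] at h0
          rw [h0]
          have hmem := PySem.List.max?_mem hv
          rw [hvals, List.mem_map] at hmem
          obtain ⟨k, hk, rfl⟩ := hmem
          simp [hcntdef]
        · rw [← hMdef] at hmemM
          rw [List.mem_map] at hmemM
          obtain ⟨x, hx, hxM⟩ := hmemM
          have hx' : cnt x ∈ (PySem.Dict.counter cs).values := by
            rw [hvals]
            exact List.mem_map_of_mem ((PySem.Set.mem_ofList _ _).2 hx)
          calc M = cnt x := hxM.symm
            _ ≤ v := PySem.List.max?_isMax hv _ hx'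
    have hmD : PySem.List.maxD ((PySem.Dict.counter cs).values) (fun v => v) 0 = M := by
      simp [PySem.List.maxD, hv, hvM]
    rw [hM, hmD]
    -- A's third loop
    rw [pv_foldl_dedup_filter (fun c => M = cnt c) cs []]
    simp only [List.not_mem_nil, decide_false, Bool.not_false, List.filter_true,
      List.nil_append]
    rw [pv_ofList_filter]
    -- B's comprehension
    rw [PySem.Dict.items_counter, List.filter_map, List.map_map]
    have hcm : (fun p : String × Int => p.2 == M) ∘ (fun k => (k, (cs.count k : Int)))
        = fun c => decide (M = cnt c) := by
      funext c
      simp only [Function.comp, hcntdef]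
      by_cases h : ((cs.count c : Int)) = M
      · simp [h]
      · simp [h, Ne.symm h]
    rw [hcm]
    have hid : (Prod.fst ∘ fun k : String => (k, (cs.count k : Int))) = id := rfl
    rw [hid, List.map_id]

-- ===== VERDICT (by name: the statement is the Claim_ definition above) =====
theorem list_char_count_spec : Claim_equal_list_char_count := by
  intro fl _ _
  unfold Spec_list_char_count
  exact pv_eq fl
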